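-- pv_equiv track=rewrite | github.com/antoineprudhomme5/hackerrank | algorithms/bit_manipulation/xor-se.py | solve
-- ===== SOURCE A (Python) =====
-- def val(i):
--     # we can get the value at index i in O(1), because of the pattern
--     if i%4 == 0: return i
--     if i%4 == 1: return 1
--     if i%4 == 2: return i+1
--     if i%4 == 3: return 0
--
-- def solve(L, R):
--     r = 0
--     # ignore blocks of length 8 starting at index i
--     # such as i%8 == 0, because XOR all the elements = 0
--     while (L+1)%8 != 0 and R >= L:
--         r ^= val(L)
--         L += 1
--     if R > L:
--         while (R+1)%8 != 0:
--             r ^= val(R)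
--             R -= 1
--     return r
-- ===== SOURCE B (Python) =====
-- def val(i):
--     if i % 4 == 0: return i
--     if i % 4 == 1: return 1
--     if i % 4 == 2: return i + 1
--     if i % 4 == 3: return 0
--
--
-- def prefix_xor(n):
--     # XOR of val(i) over the tail partial block [n - n % 8, n).
--     # Full 8-blocks starting at a multiple of 8 XOR to 0, so this
--     # equals the XOR of val over every i below n (down from any block start).
--     r = 0
--     for i in range(n - n % 8, n):
--         r ^= val(i)
--     return r
--
--
-- def solve(L, R):
--     if R < L:
--         return 0
--     return prefix_xor(L) ^ prefix_xor(R + 1)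
-- ===== Notes on version B (the rewrite author's own statement) =====
-- stated objective: alternative
-- what changed: Replaces A's two boundary-trimming while loops (advance L to the next index ≡7 mod 8, then decrement R likewise) with a prefix-XOR difference: prefix_xor(n) scans only the tail partial 8-block below n, and the answer is prefix_xor(L) ^ prefix_xor(R+1), relying on full 8-blocks XORing to 0.
import Mathlib
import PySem

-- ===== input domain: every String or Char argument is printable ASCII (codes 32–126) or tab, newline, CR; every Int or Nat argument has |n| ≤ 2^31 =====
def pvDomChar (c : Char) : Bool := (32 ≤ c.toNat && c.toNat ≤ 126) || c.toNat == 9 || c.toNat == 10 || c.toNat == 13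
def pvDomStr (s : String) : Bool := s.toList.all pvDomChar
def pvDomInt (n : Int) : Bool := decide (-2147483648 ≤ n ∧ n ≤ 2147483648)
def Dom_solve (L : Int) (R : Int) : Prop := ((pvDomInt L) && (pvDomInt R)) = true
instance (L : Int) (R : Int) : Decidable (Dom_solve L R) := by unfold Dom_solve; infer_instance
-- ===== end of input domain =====

-- B replaces A's two boundary-trimming while loops by a prefix-XOR difference:
-- answer = prefix_xor(L) ^ prefix_xor(R+1), where prefix_xor only scans the tail
-- partial 8-block (full 8-blocks XOR to 0); objective: alternative (same O(1) cost).

-- ===== PORT A =====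
-- shared same-module helper val(i) (used verbatim by both Pythons)
def val (i : Int) : Int :=
  if PySem.Int.mod i 4 = 0 then i
  else if PySem.Int.mod i 4 = 1 then 1
  else if PySem.Int.mod i 4 = 2 then i + 1
  else 0

-- first while loop: advances L, returns (final L, accumulated r)
def solveLoop1 (L R r : Int) : Int × Int :=
  if PySem.Int.mod (L + 1) 8 ≠ 0 ∧ R ≥ L then
    solveLoop1 (L + 1) R (PySem.Int.bxor r (val L))
  else (L, r)
termination_by (R - L + 1).toNat
decreasing_by omega

-- second while loop: decrements R, accumulating into r
def solveLoop2 (R r : Int) : Int :=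
  if PySem.Int.mod (R + 1) 8 ≠ 0 then
    solveLoop2 (R - 1) (PySem.Int.bxor r (val R))
  else r
termination_by ((R + 1) % 8).toNat
decreasing_by
  simp only [PySem.Int.mod_eq_emod_of_pos (show (0:Int) < 8 by norm_num)] at *
  omega

def solve (L : Int) (R : Int) : Int :=
  let p := solveLoop1 L R 0
  if R > p.1 then solveLoop2 R p.2 else p.2

-- ===== PORT B =====
-- XOR of val(i) over the tail partial block [n - n % 8, n)
def prefix_xor (n : Int) : Int :=
  (PySem.List.pyRange (n - PySem.Int.mod n 8) n 1).foldl
    (fun r i => PySem.Int.bxor r (val i)) 0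

def solve_alt (L : Int) (R : Int) : Int :=
  if R < L then 0 else PySem.Int.bxor (prefix_xor L) (prefix_xor (R + 1))

-- ===== PRECONDITION & SPEC =====
def Spec_solve (L : Int) (R : Int) (out : Int) : Prop := out = solve_alt L R
instance (L : Int) (R : Int) (out : Int) : Decidable (Spec_solve L R out) := by unfold Spec_solve; infer_instance

-- ===== CLAIM (what is proved, stated in full; the proofs are below) =====
def Claim_equal_solve : Prop := ∀ (L : Int) (R : Int), Dom_solve L R → Spec_solve L R (solve L R)

-- ===== LEMMAS AND PROOFS =====

-- mod with positive literal divisor is emod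
theorem pm (x : Int) (b : Int) (hb : 0 < b) : PySem.Int.mod x b = x % b :=
  PySem.Int.mod_eq_emod_of_pos hb

-- sign-case characterisations of PySem.Int.bxor
theorem bxor_nn {a b : Int} (ha : 0 ≤ a) (hb : 0 ≤ b) :
    PySem.Int.bxor a b = ((a.toNat ^^^ b.toNat : Nat) : Int) := by
  simp [PySem.Int.bxor, ha, hb]

theorem bxor_np {a b : Int} (ha : 0 ≤ a) (hb : b < 0) :
    PySem.Int.bxor a b = -((a.toNat ^^^ (-b - 1).toNat : Nat) : Int) - 1 := by
  simp [PySem.Int.bxor, ha, not_le.2 hb]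

theorem bxor_pn {a b : Int} (ha : a < 0) (hb : 0 ≤ b) :
    PySem.Int.bxor a b = -(((-a - 1).toNat ^^^ b.toNat : Nat) : Int) - 1 := by
  simp [PySem.Int.bxor, not_le.2 ha, hb]

theorem bxor_pp {a b : Int} (ha : a < 0) (hb : b < 0) :
    PySem.Int.bxor a b = (((-a - 1).toNat ^^^ (-b - 1).toNat : Nat) : Int) := by
  simp [PySem.Int.bxor, not_le.2 ha, not_le.2 hb]

theorem zero_bxor (a : Int) : PySem.Int.bxor 0 a = a := by
  rw [PySem.Int.bxor_comm]; exact PySem.Int.bxor_zero a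

theorem bxor_assoc (a b c : Int) :
    PySem.Int.bxor (PySem.Int.bxor a b) c = PySem.Int.bxor a (PySem.Int.bxor b c) := by
  rcases le_or_gt 0 a with ha | ha <;> rcases le_or_gt 0 b with hb | hb <;>
    rcases le_or_gt 0 c with hc | hc
  · rw [bxor_nn ha hb, bxor_nn hb hc, bxor_nn (Int.natCast_nonneg _) hc,
        bxor_nn ha (Int.natCast_nonneg _)]
    simp [Nat.xor_assoc]
  · rw [bxor_nn ha hb, bxor_np hb hc, bxor_np (Int.natCast_nonneg _) hc,
        bxor_np ha (by omega)]
    simp [Nat.xor_assoc]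
  · rw [bxor_np ha hb, bxor_pn hb hc, bxor_pn (by omega) hc,
        bxor_np ha (by omega)]
    simp [Nat.xor_assoc]
  · rw [bxor_np ha hb, bxor_pp hb hc, bxor_pp (by omega) hc,
        bxor_nn ha (Int.natCast_nonneg _)]
    simp [Nat.xor_assoc]
  · rw [bxor_pn ha hb, bxor_nn hb hc, bxor_pn (by omega) hc,
        bxor_pn ha (Int.natCast_nonneg _)]
    simp [Nat.xor_assoc]
  · rw [bxor_pn ha hb, bxor_np hb hc, bxor_pp (by omega) hc,
        bxor_pp ha (by omega)]
    simp [Nat.xor_assoc]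
  · rw [bxor_pp ha hb, bxor_pn hb hc, bxor_nn (Int.natCast_nonneg _) hc,
        bxor_pp ha (by omega)]
    simp [Nat.xor_assoc]
  · rw [bxor_pp ha hb, bxor_pp hb hc, bxor_np (Int.natCast_nonneg _) hc,
        bxor_pn ha (Int.natCast_nonneg _)]
    simp [Nat.xor_assoc]

theorem bxor_left_comm (a b c : Int) :
    PySem.Int.bxor a (PySem.Int.bxor b c) = PySem.Int.bxor b (PySem.Int.bxor a c) := by
  rw [← bxor_assoc, PySem.Int.bxor_comm a b, bxor_assoc]

theorem bxor_cancel_left (a c : Int) : PySem.Int.bxor a (PySem.Int.bxor a c) = c := by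
  rw [← bxor_assoc, PySem.Int.bxor_self, zero_bxor]

-- low-3-bit xor of numbers sharing the same high bits
theorem nat8 (n a b : Nat) (ha : a < 8) (hb : b < 8) : (8*n+a) ^^^ (8*n+b) = a ^^^ b := by
  apply Nat.eq_of_testBit_eq
  intro i
  rw [Nat.testBit_xor, Nat.testBit_xor]
  have h8 : (8:Nat) = 2^3 := by norm_num
  rw [h8] at ha hb ⊢
  rw [Nat.testBit_two_pow_mul_add _ ha, Nat.testBit_two_pow_mul_add _ hb]
  by_cases h : i < 3
  · simp [h]
  · have hpow : (2:Nat)^3 ≤ 2^i := Nat.pow_le_pow_right (by norm_num) (by omega)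
    simp only [h, if_false]
    rw [Nat.testBit_eq_false_of_lt (lt_of_lt_of_le ha hpow),
        Nat.testBit_eq_false_of_lt (lt_of_lt_of_le hb hpow)]
    simp

theorem key8a (k : Int) (h : k % 8 = 0) : PySem.Int.bxor k (k + 3) = 3 := by
  rcases le_or_gt 0 k with hk | hk
  · rw [bxor_nn hk (by omega)]
    have h1 : k.toNat = 8 * (k.toNat / 8) + 0 := by omega
    have h2 : (k + 3).toNat = 8 * (k.toNat / 8) + 3 := by omega
    rw [h1, h2, nat8 _ 0 3 (by norm_num) (by norm_num)]
    decide
  · rw [bxor_pp hk (by omega)]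
    have h1 : (-k - 1).toNat = 8 * ((-k - 1).toNat / 8) + 7 := by omega
    have h2 : (-(k + 3) - 1).toNat = 8 * ((-k - 1).toNat / 8) + 4 := by omega
    rw [h1, h2, nat8 _ 7 4 (by norm_num) (by norm_num)]
    decide

theorem key8b (k : Int) (h : k % 8 = 0) : PySem.Int.bxor (k + 4) (k + 7) = 3 := by
  rcases le_or_gt 0 (k + 4) with hk | hk
  · rw [bxor_nn hk (by omega)]
    have h1 : (k + 4).toNat = 8 * ((k + 4).toNat / 8) + 4 := by omega
    have h2 : (k + 7).toNat = 8 * ((k + 4).toNat / 8) + 7 := by omega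
    rw [h1, h2, nat8 _ 4 7 (by norm_num) (by norm_num)]
    decide
  · rw [bxor_pp hk (by omega)]
    have h1 : (-(k + 4) - 1).toNat = 8 * ((-(k + 4) - 1).toNat / 8) + 3 := by omega
    have h2 : (-(k + 7) - 1).toNat = 8 * ((-(k + 4) - 1).toNat / 8) + 0 := by omega
    rw [h1, h2, nat8 _ 3 0 (by norm_num) (by norm_num)]
    decide

-- XOR of val over [a, b)
def xr (a b : Int) : Int :=
  if h : a < b then PySem.Int.bxor (val a) (xr (a + 1) b) else 0
termination_by (b - a).toNat
decreasing_by omega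

theorem xr_nil {a b : Int} (h : b ≤ a) : xr a b = 0 := by
  rw [xr]; simp [not_lt.2 h]

theorem xr_cons {a b : Int} (h : a < b) : xr a b = PySem.Int.bxor (val a) (xr (a + 1) b) := by
  rw [xr]; simp [h]

theorem xr_split (a b c : Int) (h1 : a ≤ b) (h2 : b ≤ c) :
    xr a c = PySem.Int.bxor (xr a b) (xr b c) := by
  obtain ⟨n, hn⟩ : ∃ n : Nat, (b - a).toNat = n := ⟨_, rfl⟩
  induction n generalizing a with
  | zero =>
    have hab : a = b := by omega
    subst hab
    rw [xr_nil le_rfl, zero_bxor]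
  | succ n ih =>
    have hab : a < b := by omega
    rw [xr_cons hab, xr_cons (lt_of_lt_of_le hab h2), ih (a + 1) (by omega) (by omega),
        bxor_assoc]

theorem xr_succ_right (a b : Int) (h : a ≤ b) :
    xr a (b + 1) = PySem.Int.bxor (xr a b) (val b) := by
  rw [xr_split a b (b+1) h (by omega), xr_cons (show b < b + 1 by omega),
      xr_nil (show b + 1 ≤ b + 1 by omega), PySem.Int.bxor_zero]

theorem val_eval (i : Int) :
    val i = if i % 4 = 0 then i else if i % 4 = 1 then 1 else if i % 4 = 2 then i + 1 else 0 := by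
  unfold val
  rw [pm _ _ (by norm_num)]

theorem val_at (i : Int) (m : Int) (hm : i % 4 = m) :
    val i = (if m = 0 then i else if m = 1 then 1 else if m = 2 then i + 1 else 0) := by
  rw [val_eval, hm]

theorem xr_block (k : Int) (h : k % 8 = 0) : xr k (k + 8) = 0 := by
  rw [xr_cons (by omega), xr_cons (by omega), xr_cons (by omega), xr_cons (by omega),
      xr_cons (by omega), xr_cons (by omega), xr_cons (by omega), xr_cons (by omega),
      xr_nil (by omega),
      val_at k 0 (by omega), val_at (k+1) 1 (by omega), val_at (k+1+1) 2 (by omega),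
      val_at (k+1+1+1) 3 (by omega), val_at (k+1+1+1+1) 0 (by omega),
      val_at (k+1+1+1+1+1) 1 (by omega), val_at (k+1+1+1+1+1+1) 2 (by omega),
      val_at (k+1+1+1+1+1+1+1) 3 (by omega)]
  ring_nf
  norm_num
  have ha : PySem.Int.bxor k (3 + k) = 3 := by rw [add_comm 3 k]; exact key8a k h
  have hb : PySem.Int.bxor (4 + k) (7 + k) = 3 := by
    rw [add_comm 4 k, add_comm 7 k]; exact key8b k h
  rw [bxor_left_comm (4 + k) 1 (7 + k), hb, zero_bxor, bxor_left_comm (3 + k) 1 3,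
      bxor_left_comm k 1, bxor_left_comm k 1, ← bxor_assoc k (3 + k) 3, ha]
  decide

theorem xr_blocks (a b : Int) (ha : a % 8 = 0) (hb : b % 8 = 0) (hab : a ≤ b) :
    xr a b = 0 := by
  obtain ⟨n, hn⟩ : ∃ n : Nat, (b - a).toNat = n := ⟨_, rfl⟩
  induction n using Nat.strong_induction_on generalizing a with
  | _ n ih =>
    rcases eq_or_lt_of_le hab with heq | hlt
    · subst heq; exact xr_nil le_rfl
    · have h8 : a + 8 ≤ b := by omega
      rw [xr_split a (a + 8) b (by omega) h8, xr_block a ha,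
          ih (n - 8) (by omega) (a + 8) (by omega) (by omega) (by omega), PySem.Int.bxor_zero]

theorem loop1_spec (L R r : Int) : L ≤ R + 1 →
    (solveLoop1 L R r).2 = PySem.Int.bxor r (xr L (solveLoop1 L R r).1)
    ∧ L ≤ (solveLoop1 L R r).1 ∧ (solveLoop1 L R r).1 ≤ R + 1
    ∧ ((solveLoop1 L R r).1 % 8 = 7 ∨ (solveLoop1 L R r).1 = R + 1) := by
  obtain ⟨n, hn⟩ : ∃ n : Nat, (R + 1 - L).toNat = n := ⟨_, rfl⟩
  induction n using Nat.strong_induction_on generalizing L r with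
  | _ n ih =>
    intro hL
    by_cases hc : PySem.Int.mod (L + 1) 8 ≠ 0 ∧ R ≥ L
    · rw [solveLoop1, if_pos hc]
      have hR : R ≥ L := hc.2
      obtain ⟨ih1, ih2, ih3, ih4⟩ :=
        ih (n - 1) (by omega) (L + 1) (PySem.Int.bxor r (val L)) (by omega) (by omega)
      refine ⟨?_, by omega, ih3, ih4⟩
      rw [ih1, xr_cons (show L < (solveLoop1 (L + 1) R (PySem.Int.bxor r (val L))).1 by omega),
          ← bxor_assoc]
    · rw [solveLoop1, if_neg hc]
      rw [not_and_or, not_not, not_le, pm _ _ (by norm_num)] at hc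
      refine ⟨by rw [xr_nil le_rfl, PySem.Int.bxor_zero], le_refl L, hL, ?_⟩
      rcases hc with h | h
      · left; omega
      · right; omega

theorem loop2_spec (R r : Int) :
    solveLoop2 R r = PySem.Int.bxor r (xr (R - (R + 1) % 8 + 1) (R + 1)) := by
  obtain ⟨n, hn⟩ : ∃ n : Nat, ((R + 1) % 8).toNat = n := ⟨_, rfl⟩
  induction n using Nat.strong_induction_on generalizing R r with
  | _ n ih =>
    by_cases hc : PySem.Int.mod (R + 1) 8 ≠ 0
    · rw [solveLoop2, if_pos hc, ih (n - 1) (by rw [pm _ _ (by norm_num)] at hc; omega)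
        (R - 1) (PySem.Int.bxor r (val R)) (by rw [pm _ _ (by norm_num)] at hc; omega)]
      rw [pm _ _ (by norm_num)] at hc
      have hs : R - 1 - (R - 1 + 1) % 8 + 1 = R - (R + 1) % 8 + 1 := by omega
      have hr : R - 1 + 1 = R := by ring
      rw [hs, hr, bxor_assoc, xr_succ_right _ R (by omega),
          PySem.Int.bxor_comm (val R) (xr (R - (R + 1) % 8 + 1) R)]
    · rw [solveLoop2, if_neg hc]
      rw [not_not, pm _ _ (by norm_num)] at hc
      have hs : R - (R + 1) % 8 + 1 = R + 1 := by omega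
      rw [hs, xr_nil le_rfl, PySem.Int.bxor_zero]

theorem A_eq (L R : Int) : solve L R = if R < L then 0 else xr L (R + 1) := by
  simp only [solve]
  by_cases hRL : R < L
  · have e : solveLoop1 L R 0 = (L, 0) := by
      rw [solveLoop1, if_neg]
      intro hcon
      exact absurd hcon.2 (by omega)
    rw [e, if_neg (show ¬R > (L, (0:Int)).1 by omega), if_pos hRL]
  · obtain ⟨h1, h2, h3, h4⟩ := loop1_spec L R 0 (by omega)
    rw [zero_bxor] at h1
    rw [if_neg hRL]
    by_cases hR : R > (solveLoop1 L R 0).1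
    · rw [if_pos hR, loop2_spec, h1]
      have hm7 : (solveLoop1 L R 0).1 % 8 = 7 := by
        rcases h4 with h | h
        · exact h
        · omega
      have hS0 : (R - (R + 1) % 8 + 1) % 8 = 0 := by omega
      have hLS : (solveLoop1 L R 0).1 + 1 ≤ R - (R + 1) % 8 + 1 := by omega
      rw [xr_split L (solveLoop1 L R 0).1 (R + 1) h2 (by omega),
          xr_split (solveLoop1 L R 0).1 ((solveLoop1 L R 0).1 + 1) (R + 1) (by omega) (by omega),
          xr_split ((solveLoop1 L R 0).1 + 1) (R - (R + 1) % 8 + 1) (R + 1) hLS (by omega),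
          xr_cons (show (solveLoop1 L R 0).1 < (solveLoop1 L R 0).1 + 1 by omega),
          xr_nil (le_refl ((solveLoop1 L R 0).1 + 1)), PySem.Int.bxor_zero,
          val_at (solveLoop1 L R 0).1 3 (by omega)]
      norm_num
      rw [zero_bxor,
          xr_blocks ((solveLoop1 L R 0).1 + 1) (R - (R + 1) % 8 + 1) (by omega) hS0 hLS,
          zero_bxor]
    · rw [if_neg hR, h1]
      by_cases hend : (solveLoop1 L R 0).1 = R + 1
      · rw [hend]
      · have hm7 : (solveLoop1 L R 0).1 % 8 = 7 := by
          rcases h4 with h | h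
          · exact h
          · exact absurd h hend
        have hR7 : R % 8 = 7 := by omega
        have hLR : (solveLoop1 L R 0).1 = R := by omega
        rw [hLR, xr_succ_right L R (by omega), val_at R 3 (by omega), if_neg (by norm_num),
            if_neg (by norm_num), if_neg (by norm_num), PySem.Int.bxor_zero]

theorem foldl_xr (a b r : Int) :
    (PySem.List.pyRange a b 1).foldl (fun r i => PySem.Int.bxor r (val i)) r
      = PySem.Int.bxor r (xr a b) := by
  obtain ⟨n, hn⟩ : ∃ n : Nat, (b - a).toNat = n := ⟨_, rfl⟩
  induction n generalizing a r with
  | zero =>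
    rw [PySem.List.pyRange_one_eq_nil (by omega), xr_nil (by omega), PySem.Int.bxor_zero]
    rfl
  | succ n ih =>
    rw [PySem.List.pyRange_one_cons (by omega)]
    simp only [List.foldl_cons]
    rw [ih (a + 1) _ (by omega), xr_cons (show a < b by omega), ← bxor_assoc]

theorem B_eq (L R : Int) : solve_alt L R = if R < L then 0 else xr L (R + 1) := by
  unfold solve_alt
  by_cases h : R < L
  · rw [if_pos h, if_pos h]
  · rw [if_neg h, if_neg h]
    unfold prefix_xor
    rw [pm _ _ (by norm_num), pm _ _ (by norm_num), foldl_xr, foldl_xr, zero_bxor, zero_bxor]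
    have key : xr (R + 1 - (R + 1) % 8) (R + 1)
        = PySem.Int.bxor (xr (L - L % 8) L) (xr L (R + 1)) := by
      have h1 : xr (L - L % 8) (R + 1)
          = PySem.Int.bxor (xr (L - L % 8) (R + 1 - (R + 1) % 8))
              (xr (R + 1 - (R + 1) % 8) (R + 1)) :=
        xr_split _ _ _ (by omega) (by omega)
      have h2 : xr (L - L % 8) (R + 1) = PySem.Int.bxor (xr (L - L % 8) L) (xr L (R + 1)) :=
        xr_split _ _ _ (by omega) (by omega)
      rw [xr_blocks (L - L % 8) (R + 1 - (R + 1) % 8) (by omega) (by omega) (by omega),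
          zero_bxor] at h1
      rw [← h1, h2]
    rw [key, bxor_cancel_left]

-- ===== VERDICT (by name: the statement is the Claim_ definition above) =====
theorem solve_spec : Claim_equal_solve := by
  intro L R _
  unfold Spec_solve
  rw [A_eq, B_eq]
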